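-- pv_equiv track=rewrite | github.com/moalhelu/dejavplus-bots | bot_core/services/images.py | _select_images
-- ===== SOURCE A (Python) =====
-- from typing import Any, Dict, List, Optional, Tuple
--
-- _PHOTO_EXCLUDE_MARKERS = (
--     "360view",
--     "360-view",
--     "360_view",
--     "360deg",
--     "360-degree",
--     "360degree",
--     "360spin",
--     "spin360",
--     "threesixty",
--     "3sixty",
-- )
--
-- def _is_360_spin_url(url: str) -> bool:
--     lower = url.lower()
--     if "360" not in lower and "three" not in lower:
--         return False
--     if any(marker in lower for marker in _PHOTO_EXCLUDE_MARKERS):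
--         return True
--     # Treat explicit /360/ path segments as 360-view assets but allow resolution numbers elsewhere.
--     if "/360/" in lower or lower.endswith("/360"):
--         return True
--     return False
--
-- def _select_images(urls: List[str], limit: int = 20) -> List[str]:
--     selected: List[str] = []
--     for url in urls:
--         if not isinstance(url, str):
--             continue
--         lower = url.lower()
--         if _is_360_spin_url(lower):
--             continue
--         if lower.startswith(("http://", "https://")) and url not in selected:
--             selected.append(url)
--         if len(selected) >= limit:
--             break
--     return selected
-- ===== SOURCE B (Python) =====
-- from typing import List
--
-- _PHOTO_EXCLUDE_MARKERS = (
--     "360view",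
--     "360-view",
--     "360_view",
--     "360deg",
--     "360-degree",
--     "360degree",
--     "360spin",
--     "spin360",
--     "threesixty",
--     "3sixty",
-- )
--
-- def _is_360_spin_url(url: str) -> bool:
--     lower = url.lower()
--     if "360" not in lower and "three" not in lower:
--         return False
--     if any(marker in lower for marker in _PHOTO_EXCLUDE_MARKERS):
--         return True
--     if "/360/" in lower or lower.endswith("/360"):
--         return True
--     return False
--
-- def _keep(url) -> bool:
--     if not isinstance(url, str):
--         return False
--     lower = url.lower()
--     return lower.startswith(("http://", "https://")) and not _is_360_spin_url(lower)
--
-- def _select_images(urls: List[str], limit: int = 20) -> List[str]: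
--     # Selection-by-purging: pre-filter once, then repeatedly emit the head of the
--     # remaining worklist and purge all of its later duplicates from that worklist.
--     # No seen-set / membership test against the output is ever needed.
--     out: List[str] = []
--     pending = [u for u in urls if _keep(u)]
--     remaining = limit
--     while remaining > 0 and pending:
--         head = pending[0]
--         out.append(head)
--         remaining -= 1
--         pending = [x for x in pending[1:] if x != head]
--     return out
-- ===== Notes on version B (the rewrite author's own statement) =====
-- stated objective: alternative
-- what changed: A's single loop that tests each URL for membership in the growing output and breaks once len(selected) >= limit is replaced by a purge-based worklist algorithm: pre-filter once, then repeatedly emit the head of the worklist and delete all its later duplicates from the worklist, decrementing a remaining counter; no seen-set or membership test against the output exists in B.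
-- intended difference: On nonpositive limit when the first non-360 URL in the list is http(s)-prefixed, A still returns that single URL because its break check only runs after appending, while B returns an empty list — the intended result of selecting at most limit<=0 images. — e.g. on _select_images(["http://a"], 0): A returns ["http://a"], B returns []
import Mathlib
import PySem

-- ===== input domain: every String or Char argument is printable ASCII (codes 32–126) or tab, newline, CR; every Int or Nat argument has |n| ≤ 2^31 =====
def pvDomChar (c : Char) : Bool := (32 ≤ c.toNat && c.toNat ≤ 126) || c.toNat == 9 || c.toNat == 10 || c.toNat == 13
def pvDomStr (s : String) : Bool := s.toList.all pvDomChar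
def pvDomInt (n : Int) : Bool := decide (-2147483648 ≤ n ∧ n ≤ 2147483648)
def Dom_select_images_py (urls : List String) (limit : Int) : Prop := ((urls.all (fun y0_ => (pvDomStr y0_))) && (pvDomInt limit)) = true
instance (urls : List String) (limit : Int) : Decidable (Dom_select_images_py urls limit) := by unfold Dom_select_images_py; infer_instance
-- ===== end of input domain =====

-- B replaces A's single loop (seen-set membership scan + post-append break) by a purge-based worklist: pre-filter once, then repeatedly emit the head and delete its later duplicates; objective: alternative.


-- ===== PORT A =====
-- module constant _PHOTO_EXCLUDE_MARKERS
def pvMarkers : List String :=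
  ["360view", "360-view", "360_view", "360deg", "360-degree", "360degree",
   "360spin", "spin360", "threesixty", "3sixty"]

-- helper _is_360_spin_url (shared module helper, used verbatim by A and B)
def pvIs360 (url : String) : Bool :=
  let lower := PySem.Str.lower url
  if !PySem.Str.isIn "360" lower && !PySem.Str.isIn "three" lower then false
  else if pvMarkers.any (fun marker => PySem.Str.isIn marker lower) then true
  else if PySem.Str.isIn "/360/" lower || PySem.Str.endswith lower "/360" then true
  else false

-- url.lower().startswith(("http://", "https://")) — the tuple startswith test both versions perform
def pvHttpOk (url : String) : Bool :=
  PySem.Str.startswith (PySem.Str.lower url) "http://"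
    || PySem.Str.startswith (PySem.Str.lower url) "https://"

-- A's for-loop with its continue / append / break, as structural recursion over urls
def pvSelGo (limit : Int) : List String → List String → List String
  | selected, [] => selected
  | selected, url :: rest =>
    if pvIs360 (PySem.Str.lower url) then pvSelGo limit selected rest
    else
      let selected' :=
        if pvHttpOk url && !selected.contains url then selected ++ [url] else selected
      if limit ≤ (selected'.length : Int) then selected' else pvSelGo limit selected' rest

def select_images_py (urls : List String) (limit : Int) : List String :=
  pvSelGo limit [] urls

-- ===== PORT B =====
-- B's _keep helper (isinstance(url, str) is always true under the type convention)
def pvKeep (url : String) : Bool :=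
  pvHttpOk url && !pvIs360 (PySem.Str.lower url)

-- B's while-loop: emit the head of the worklist, purge its later duplicates, count down.
-- fuel = initial worklist length; purging only shrinks the worklist, so the guard is never hit.
def pvGoB (fuel : Nat) (remaining : Int) (pending : List String) : List String :=
  match fuel, pending with
  | _, [] => []
  | 0, _ :: _ => []
  | fuel + 1, head :: rest =>
    if remaining ≤ 0 then []
    else head :: pvGoB fuel (remaining - 1) (rest.filter (fun x => x ≠ head))

def select_images_py_alt (urls : List String) (limit : Int) : List String :=
  let pending := urls.filter pvKeep
  pvGoB pending.length limit pending

-- ===== PRECONDITION & SPEC =====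
-- first element that is not a 360-spin URL is http(s)-prefixed (a condition on the input only)
def pvFirstNon360Http (urls : List String) : Bool :=
  match urls.find? (fun x => !pvIs360 (PySem.Str.lower x)) with
  | some u => pvHttpOk u
  | none => false

-- On nonpositive limit when the first non-360 URL in the list is http(s)-prefixed, A still returns that
-- single URL because its break check only runs after appending, while B returns an empty list — the intended result
-- of selecting at most limit ≤ 0 images.
def D_select_images_py (urls : List String) (limit : Int) : Prop :=
  limit ≤ 0 ∧ pvFirstNon360Http urls = true
instance (urls : List String) (limit : Int) : Decidable (D_select_images_py urls limit) := by
  unfold D_select_images_py; infer_instance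

def Spec_select_images_py (urls : List String) (limit : Int) (out : List String) : Prop :=
  ¬ D_select_images_py urls limit → out = select_images_py_alt urls limit
instance (urls : List String) (limit : Int) (out : List String) : Decidable (Spec_select_images_py urls limit out) := by
  unfold Spec_select_images_py; infer_instance

def pvDiffWitness_select_images_py : List String × Int := (["http://a"], 0)
def pvDiffWitnessOut_select_images_py : (List String) × (List String) := (["http://a"], [])

-- ===== CLAIM (what is proved, stated in full; the proofs are below) =====
def Claim_unchanged_select_images_py : Prop := ∀ (urls : List String) (limit : Int), Dom_select_images_py urls limit → Spec_select_images_py urls limit (select_images_py urls limit)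
def Claim_changed_select_images_py : Prop := Dom_select_images_py (pvDiffWitness_select_images_py.1) (pvDiffWitness_select_images_py.2) ∧ D_select_images_py (pvDiffWitness_select_images_py.1) (pvDiffWitness_select_images_py.2) ∧ select_images_py (pvDiffWitness_select_images_py.1) (pvDiffWitness_select_images_py.2) = pvDiffWitnessOut_select_images_py.1 ∧ select_images_py_alt (pvDiffWitness_select_images_py.1) (pvDiffWitness_select_images_py.2) = pvDiffWitnessOut_select_images_py.2 ∧ pvDiffWitnessOut_select_images_py.1 ≠ pvDiffWitnessOut_select_images_py.2
def Claim_exact_select_images_py : Prop := ∀ (urls : List String) (limit : Int), Dom_select_images_py urls limit → D_select_images_py urls limit → select_images_py urls limit ≠ select_images_py_alt urls limit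

-- ===== LEMMAS AND PROOFS =====

-- ordered dedup relative to an already-seen prefix: common characterisation of both loops
def pvDedupFrom (seen : List String) : List String → List String
  | [] => []
  | u :: rest =>
    if seen.contains u then pvDedupFrom seen rest
    else u :: pvDedupFrom (seen ++ [u]) rest

-- pvDedupFrom only consults membership of seen
lemma pvDedup_congr (s1 s2 : List String) (h : ∀ a, (a ∈ s1) ↔ (a ∈ s2)) (xs : List String) :
    pvDedupFrom s1 xs = pvDedupFrom s2 xs := by
  induction xs generalizing s1 s2 with
  | nil => rfl
  | cons u rest ih =>
    by_cases hm : u ∈ s1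
    · simp [pvDedupFrom, hm, (h u).mp hm, ih s1 s2 h]
    · have hm2 : u ∉ s2 := fun hx => hm ((h u).mpr hx)
      simp only [pvDedupFrom, List.contains_eq_mem, hm, hm2, decide_false, if_neg Bool.false_ne_true]
      exact congrArg _ (ih _ _ (by intro a; simp [h a]))

-- purging duplicates of u from the tail = remembering u as seen
lemma pvDedup_filter (u : String) (xs : List String) : ∀ seen : List String,
    pvDedupFrom (seen ++ [u]) xs = pvDedupFrom seen (xs.filter (fun x => x ≠ u)) := by
  induction xs with
  | nil => intro seen; rfl
  | cons x rest ih =>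
    intro seen
    by_cases hxu : x = u
    · subst hxu
      simp [pvDedupFrom, List.filter, ih seen]
    · by_cases hm : x ∈ seen
      · simp [pvDedupFrom, List.filter, hxu, hm, ih seen]
      · have hm' : x ∉ seen ++ [u] := by simp [hxu, hm]
        simp only [pvDedupFrom, List.filter, hxu, List.contains_eq_mem, hm, hm',
          decide_false, if_neg Bool.false_ne_true, decide_not, Bool.not_false]
        refine congrArg _ ?_
        rw [pvDedup_congr (seen ++ [u] ++ [x]) (seen ++ [x] ++ [u]) (by intro a; simp; tauto) rest]
        simpa using ih (seen ++ [x])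

-- B's worklist loop computes the limit-prefix of the ordered dedup (given enough fuel)
lemma pvGoB_eq_take (fuel : Nat) : ∀ (remaining : Int) (xs : List String), xs.length ≤ fuel →
    pvGoB fuel remaining xs = (pvDedupFrom [] xs).take remaining.toNat := by
  induction fuel with
  | zero =>
    intro remaining xs hlen
    have : xs = [] := List.eq_nil_of_length_eq_zero (Nat.le_zero.mp hlen)
    simp [this, pvGoB, pvDedupFrom]
  | succ fuel ih =>
    intro remaining xs hlen
    match xs with
    | [] => simp [pvGoB, pvDedupFrom]
    | head :: rest =>
      by_cases hle : remaining ≤ 0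
      · have : remaining.toNat = 0 := by omega
        simp [pvGoB, hle, this]
      · have hlen' : (rest.filter (fun x => x ≠ head)).length ≤ fuel :=
          le_trans (List.length_filter_le _ _) (by simpa using hlen)
        have htk : remaining.toNat = (remaining - 1).toNat + 1 := by omega
        rw [pvGoB, if_neg hle, pvDedupFrom, htk]
        simp only [List.contains_eq_mem, List.not_mem_nil, decide_false,
          if_neg Bool.false_ne_true, List.take_succ_cons]
        rw [show pvDedupFrom ([] ++ [head]) rest
              = pvDedupFrom [] (rest.filter (fun x => x ≠ head)) from pvDedup_filter head rest []]
        exact congrArg _ (ih _ _ hlen')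

lemma pvSelGo_eq_take (limit : Int) (rest : List String) :
    ∀ selected : List String, (selected.length : Int) < limit →
      pvSelGo limit selected rest
        = selected ++ (pvDedupFrom selected (rest.filter pvKeep)).take (limit - selected.length).toNat := by
  induction rest with
  | nil => intro selected _; simp [pvSelGo, pvDedupFrom]
  | cons url rest ih =>
    intro selected hlt
    by_cases h360 : pvIs360 (PySem.Str.lower url) = true
    · have hk : pvKeep url = false := by simp [pvKeep, h360]
      simp [pvSelGo, h360, hk, ih selected hlt]
    · by_cases hhttp : pvHttpOk url = true
      · have hk : pvKeep url = true := by simp [pvKeep, hhttp, h360]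
        by_cases hmem : url ∈ selected
        · have hbr : ¬ (limit ≤ ((selected.length : Nat) : Int)) := by omega
          simp [pvSelGo, h360, hhttp, hmem, hbr, hk, pvDedupFrom,
            ih selected hlt]
        · have hc : selected.contains url = false := by simpa using hmem
          by_cases hstop : limit ≤ ((selected.length : Nat) : Int) + 1
          · have h1 : (limit - (selected.length : Int)).toNat = 1 := by omega
            simp [pvSelGo, h360, hhttp, hk, pvDedupFrom, hmem, h1]
            all_goals (intro h; exact absurd hstop (by omega))
          · have hlt' : (((selected ++ [url]).length : Nat) : Int) < limit := by simp; omega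
            have htk : (limit - (selected.length : Int)).toNat
                = (limit - ((selected.length : Int) + 1)).toNat + 1 := by omega
            simp [pvSelGo, h360, hhttp, hk, pvDedupFrom, hmem, htk,
              ih (selected ++ [url]) hlt']
            all_goals (intro h; exact absurd h (by omega))
      · have hk : pvKeep url = false := by simp [pvKeep, hhttp]
        have hbr : ¬ (limit ≤ ((selected.length : Nat) : Int)) := by omega
        simp [pvSelGo, h360, hhttp, hbr, hk, ih selected hlt]

lemma pvSelGo_nonpos (limit : Int) (hle : limit ≤ 0) (urls : List String) :
    pvSelGo limit [] urls
      = (match urls.find? (fun x => !pvIs360 (PySem.Str.lower x)) with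
         | some u => if pvHttpOk u then [u] else []
         | none => []) := by
  induction urls with
  | nil => simp [pvSelGo]
  | cons url rest ih =>
    by_cases h360 : pvIs360 (PySem.Str.lower url) = true
    · simp [pvSelGo, h360, List.find?, ih]
    · by_cases hhttp : pvHttpOk url = true
      · simp [pvSelGo, h360, hhttp, List.find?]
        all_goals (intro h; exact absurd h (by omega))
      · simp [pvSelGo, h360, hhttp, List.find?]
        all_goals (intro h; exact absurd h (by omega))

-- ===== VERDICT (by name: the statement is the Claim_ definition above) =====
theorem select_images_py_spec : Claim_unchanged_select_images_py := by
  intro urls limit _ hnd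
  rcases lt_or_ge (0:Int) limit with hpos | hle
  swap
  · have hfalse : pvFirstNon360Http urls = false := by
      by_contra h
      exact (hnd ⟨hle, by simpa using (Bool.not_eq_false _).mp h⟩).elim
    have h0 : limit.toNat = 0 := by omega
    rw [select_images_py_alt]
    rw [pvGoB_eq_take _ _ _ le_rfl, h0, List.take_zero]
    rw [select_images_py, pvSelGo_nonpos limit hle urls]
    unfold pvFirstNon360Http at hfalse
    rcases hfind : urls.find? (fun x => !pvIs360 (PySem.Str.lower x)) with _ | u
    · simp
    · rw [hfind] at hfalse
      simp [hfalse]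
  · have hlt : ((([] : List String).length : Nat) : Int) < limit := by simp; omega
    rw [select_images_py, pvSelGo_eq_take limit urls [] hlt, select_images_py_alt]
    rw [pvGoB_eq_take _ _ _ le_rfl]
    simp

theorem select_images_py_changed : Claim_changed_select_images_py := by
  unfold Claim_changed_select_images_py; decide

theorem select_images_py_tight : Claim_exact_select_images_py := by
  intro urls limit _ hd
  rcases hd with ⟨hle, hfirst⟩
  unfold pvFirstNon360Http at hfirst
  rcases hfind : urls.find? (fun x => !pvIs360 (PySem.Str.lower x)) with _ | u
  · rw [hfind] at hfirst; simp at hfirst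
  · rw [hfind] at hfirst
    have h0 : limit.toNat = 0 := by omega
    rw [select_images_py, pvSelGo_nonpos limit hle urls, hfind, select_images_py_alt]
    rw [pvGoB_eq_take _ _ _ le_rfl, h0, List.take_zero]
    simp [hfirst]
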